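-- pv_equiv track=rewrite | github.com/waxx567/Dell | 62203768/cs50ai/0Search/tictactoe/tictactoe.py | check_down_diag
-- ===== SOURCE A (Python) =====
-- def check_down_diag(board, player):
--     """
--     Checks if any player has three in a diagonal going from top left to bottom right
--     """
--     count = 0
--     for row in range(len(board)):
--         for col in range(len(board[row])):
--             if row == col and board[row][col] == player:
--                 count += 1
--     if count == 3:
--         return True
--     else:
--         return False
-- ===== SOURCE B (Python) =====
-- def check_down_diag(board, player):
--     """
--     Checks if any player has three in a diagonal going from top left to bottom right
--     """
--     count = 0
--     for i, row in enumerate(board):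
--         if i < len(row) and row[i] == player:
--             count += 1
--     return count == 3
-- ===== Notes on version B (the rewrite author's own statement) =====
-- stated objective: simpler
-- what changed: B replaces A's nested scan over every cell (testing row == col inside) with a single pass over the rows that inspects only the diagonal cell of each row, guarded by i < len(row) so ragged rows behave identically.
import Mathlib
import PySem

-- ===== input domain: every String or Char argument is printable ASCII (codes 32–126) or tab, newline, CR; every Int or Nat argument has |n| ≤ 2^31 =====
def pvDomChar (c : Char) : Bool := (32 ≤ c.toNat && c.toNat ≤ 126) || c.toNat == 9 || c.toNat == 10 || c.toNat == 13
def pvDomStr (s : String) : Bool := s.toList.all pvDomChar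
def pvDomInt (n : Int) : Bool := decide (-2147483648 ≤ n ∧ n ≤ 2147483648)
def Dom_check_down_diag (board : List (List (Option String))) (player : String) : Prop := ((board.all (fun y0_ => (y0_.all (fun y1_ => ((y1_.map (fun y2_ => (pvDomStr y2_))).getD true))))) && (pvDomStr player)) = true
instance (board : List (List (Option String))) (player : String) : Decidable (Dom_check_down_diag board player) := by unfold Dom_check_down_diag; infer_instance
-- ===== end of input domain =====

-- B iterates once over the rows and inspects only the diagonal cell of each row
-- (guarded by i < len(row)), instead of A's nested scan of every cell; objective: simpler.

-- ===== PORT A =====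
def check_down_diag (board : List (List (Option String))) (player : String) : Bool :=
  let count : Int :=
    (PySem.List.pyRange 0 (PySem.List.len board)).foldl
      (fun c row =>
        (PySem.List.pyRange 0 (PySem.List.len (PySem.List.pyGetD board row []))).foldl
          (fun c col =>
            if row == col && (PySem.List.pyGetD (PySem.List.pyGetD board row []) col none == some player)
            then c + 1 else c) c) 0
  if count == 3 then true else false

-- ===== PORT B =====
def check_down_diag_alt (board : List (List (Option String))) (player : String) : Bool :=
  let count : Int :=
    (PySem.List.enumerate board).foldl
      (fun c p =>
        if p.1 < PySem.List.len p.2 && (PySem.List.pyGetD p.2 p.1 none == some player)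
        then c + 1 else c) 0
  count == 3

-- ===== PRECONDITION & SPEC =====
def Spec_check_down_diag (board : List (List (Option String))) (player : String) (out : Bool) : Prop := out = check_down_diag_alt board player
instance (board : List (List (Option String))) (player : String) (out : Bool) : Decidable (Spec_check_down_diag board player out) := by unfold Spec_check_down_diag; infer_instance

-- ===== CLAIM (what is proved, stated in full; the proofs are below) =====
def Claim_equal_check_down_diag : Prop := ∀ (board : List (List (Option String))) (player : String), Dom_check_down_diag board player → Spec_check_down_diag board player (check_down_diag board player)

-- ===== LEMMAS AND PROOFS =====

-- Counting the elements of range(a, b) equal to `row` and satisfying p: at most the one hit.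
theorem countP_pyRange_diag (p : Int → Bool) (row : Int) :
    ∀ (n : Nat) (a : Int),
      List.countP (fun col => row == col && p col) (PySem.List.pyRange a (a + n)) =
        if a ≤ row ∧ row < a + n ∧ p row = true then 1 else 0 := by
  intro n
  induction n with
  | zero =>
      intro a
      rw [PySem.List.pyRange_one_eq_nil (by omega)]
      simp only [List.countP_nil]
      split_ifs with h
      · omega
      · rfl
  | succ k ih =>
      intro a
      rw [PySem.List.pyRange_one_cons (by omega)]
      rw [List.countP_cons]
      have h1 : PySem.List.pyRange (a + 1) (a + (k + 1 : Nat)) =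
          PySem.List.pyRange (a + 1) ((a + 1) + (k : Nat)) := by
        congr 1
        push_cast
        ring
      rw [h1, ih (a + 1)]
      by_cases hra : row = a
      · subst hra
        simp only [beq_self_eq_true, Bool.true_and]
        split_ifs with h2 h3 h3 <;> simp_all
      · have hz : (row == a) = false := by simp [hra]
        have hcond : ((a+1 : Int) ≤ row ∧ row < (a+1) + (k : Nat) ∧ p row = true) ↔
            (a ≤ row ∧ row < a + ((k:Nat) + 1 : Nat) ∧ p row = true) := by
          constructor <;> rintro ⟨x, y, z⟩ <;>
            exact ⟨by omega, by push_cast at *; omega, z⟩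
        simp only [hz, Bool.false_and, if_neg (by simp : ¬ (false = true)), Nat.add_zero, hcond]

theorem countP_pyRange_diag' (p : Int → Bool) (row a b : Int) :
    List.countP (fun col => row == col && p col) (PySem.List.pyRange a b) =
      if a ≤ row ∧ row < b ∧ p row = true then 1 else 0 := by
  by_cases hab : a < b
  · have hb : b = a + (b - a).toNat := by omega
    rw [hb, countP_pyRange_diag]
  · rw [PySem.List.pyRange_one_eq_nil (by omega)]
    simp only [List.countP_nil]
    split_ifs with h
    · omega
    · rfl

theorem pv_if_bool (b : Bool) : (if b = true then true else false) = b := by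
  cases b <;> rfl

-- ===== VERDICT (by name: the statement is the Claim_ definition above) =====
theorem check_down_diag_spec : Claim_equal_check_down_diag := by
  intro board player _
  unfold Spec_check_down_diag check_down_diag check_down_diag_alt
  rw [PySem.List.enumerate_eq_map_pyRange board [], List.foldl_map]
  have hfold :
      (PySem.List.pyRange 0 (PySem.List.len board)).foldl
        (fun c row =>
          (PySem.List.pyRange 0 (PySem.List.len (PySem.List.pyGetD board row []))).foldl
            (fun c col =>
              if row == col && (PySem.List.pyGetD (PySem.List.pyGetD board row []) col none == some player)
              then c + 1 else c) c) (0 : Int) =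
      (PySem.List.pyRange 0 (PySem.List.len board)).foldl
        (fun c row =>
          if row < PySem.List.len (PySem.List.pyGetD board row []) &&
             (PySem.List.pyGetD (PySem.List.pyGetD board row []) row none == some player)
          then c + 1 else c) (0 : Int) := by
    apply PySem.List.foldl_congr_mem
    intro c row hrow
    have h0 : (0 : Int) ≤ row := (PySem.List.mem_pyRange_one.mp hrow).1
    rw [PySem.List.foldl_count_if, countP_pyRange_diag']
    split_ifs with h1 h2 h2 <;> simp_all
  rw [hfold]
  exact pv_if_bool _

-- (helper used only above)
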